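-- pv_equiv track=rewrite | github.com/Choi-YoungUn/TIL | SWEA/day_006/006_speed.py | moor
-- ===== SOURCE A (Python) =====
-- def moves(lists, char):
--     for i in range(len(lists) -2, -1, -1):
--         if lists[i] == char:
--             return len(lists) - 1 - i
--     return len(lists)
--
-- def moor(total, patten):
--     m = len(total)
--     n = len(patten)
--     i = 0
--     counts = 0
--     while i <= m - n:
--         j = n - 1
--         while j >= 0:
--             if total[i + j] != patten[j]:
--                 move = moves(patten, total[i + n - 1])
--                 break
--             j -= 1
--         if j == -1:
--             counts += 1
--             i += n
--         else:
--             i += move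
--     return counts
-- ===== SOURCE B (Python) =====
-- def moor(total, patten):
--     # str.count counts exactly the greedy, non-overlapping occurrences
--     # that A's Boyer-Moore-Horspool loop counts.
--     return total.count(patten)
-- ===== Notes on version B (the rewrite author's own statement) =====
-- stated objective: idiomatic
-- what changed: Replaced the hand-written Boyer-Moore-Horspool scan (which rescans the pattern on every mismatch) by the standard-library non-overlapping substring count total.count(patten), which is exactly the value A computes.
-- outside the precondition, e.g. on moor('ab', ''): A does not finish within the time limit, B returns 3
import Mathlib
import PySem

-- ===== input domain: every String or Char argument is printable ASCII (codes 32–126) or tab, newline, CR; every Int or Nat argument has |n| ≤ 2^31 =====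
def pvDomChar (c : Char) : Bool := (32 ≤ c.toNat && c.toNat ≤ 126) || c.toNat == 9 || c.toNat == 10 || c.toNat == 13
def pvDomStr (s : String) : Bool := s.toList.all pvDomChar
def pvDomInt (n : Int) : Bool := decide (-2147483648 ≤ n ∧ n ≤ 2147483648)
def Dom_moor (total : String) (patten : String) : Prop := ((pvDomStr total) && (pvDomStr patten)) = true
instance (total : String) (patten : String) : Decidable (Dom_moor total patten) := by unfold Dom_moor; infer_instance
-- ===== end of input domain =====

-- B replaces the hand-written Boyer-Moore-Horspool scan by the idiomatic total.count(patten),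
-- which returns the same greedy non-overlapping occurrence count (A diverges on patten = "", excluded by Pre_).

-- ===== PORT A =====
-- for i in range(len(lists)-2, -1, -1): if lists[i] == char: return len(lists)-1-i  /  return len(lists)
def movesLoop (lists : List Char) (char : Char) : List Int → Int
  | [] => (lists.length : Int)
  | idx :: rest =>
      if PySem.List.pyGet? lists idx = some char then (lists.length : Int) - 1 - idx
      else movesLoop lists char rest

def moves (lists : List Char) (char : Char) : Int :=
  movesLoop lists char (PySem.List.pyRange ((lists.length : Int) - 2) (-1) (-1))

-- inner 'while j >= 0' loop; fuel = (j+1).toNat; some move = break with the computed move, none = fell through (j == -1).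
-- total[i+n-1] is always in range when this runs; pyGetD's default ' ' is never used.
def moorInner (total patten : List Char) (i n : Int) : Nat → Int → Option Int
  | 0, _ => none
  | fj + 1, j =>
      if PySem.List.pyGet? total (i + j) ≠ PySem.List.pyGet? patten j then
        some (moves patten (PySem.List.pyGetD total (i + n - 1) ' '))
      else moorInner total patten i n fj (j - 1)

-- outer 'while i <= m - n' loop; i strictly increases each iteration when n ≥ 1,
-- so fuel m+1 is never exhausted (A diverges when patten = "", which Pre_ excludes).
def moorLoop (total patten : List Char) (m n : Int) : Nat → Int → Int → Int
  | 0, _, counts => counts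
  | fuel + 1, i, counts =>
      if i ≤ m - n then
        match moorInner total patten i n n.toNat (n - 1) with
        | none => moorLoop total patten m n fuel (i + n) (counts + 1)
        | some move => moorLoop total patten m n fuel (i + move) counts
      else counts

def moor (total : String) (patten : String) : Int :=
  let t := total.toList
  let p := patten.toList
  moorLoop t p (t.length : Int) (p.length : Int) (t.length + 1) 0 0

-- ===== PORT B =====
def moor_alt (total : String) (patten : String) : Int :=
  (PySem.Str.count total patten : Int)

-- ===== PRECONDITION & SPEC =====
-- A loops forever on an empty pattern (the match branch advances i by n = 0), so Pre_ excludes patten = "".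
def Pre_moor (total : String) (patten : String) : Prop := patten ≠ ""
instance (total : String) (patten : String) : Decidable (Pre_moor total patten) := by
  unfold Pre_moor; infer_instance

def pvWitness_moor : String × String := ("abab", "ab")

def Spec_moor (total : String) (patten : String) (out : Int) : Prop := out = moor_alt total patten
instance (total : String) (patten : String) (out : Int) : Decidable (Spec_moor total patten out) := by
  unfold Spec_moor; infer_instance

-- ===== CLAIM (what is proved, stated in full; the proofs are below) =====
def Claim_equal_moor : Prop := ∀ (total : String) (patten : String), Dom_moor total patten → Pre_moor total patten → Spec_moor total patten (moor total patten)

-- ===== LEMMAS AND PROOFS =====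

-- [a-1, a-2, ..., 0]
def downList (a : Nat) : List Int := (List.range a).map (fun k : Nat => (a : Int) - 1 - (k : Int))

lemma downList_succ (a : Nat) : downList (a + 1) = (a : Int) :: downList a := by
  unfold downList
  rw [List.range_succ_eq_map, List.map_cons, List.map_map]
  congr 1
  · push_cast; ring
  · apply List.map_congr_left; intro k _; simp only [Function.comp]; push_cast; ring

lemma pyRange_eq_downList (n : Nat) (hn : 1 ≤ n) :
    PySem.List.pyRange ((n : Int) - 2) (-1) (-1) = downList (n - 1) := by
  unfold PySem.List.pyRange downList
  norm_num
  rcases Nat.lt_or_ge n 2 with h2 | h2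
  · interval_cases n
    · norm_num
  · rw [if_pos (by omega)]
    have ht : ((n : Int) - 2 + 1).toNat = n - 1 := by omega
    rw [ht]
    apply List.map_congr_left
    intro k hk
    push_cast [Nat.cast_sub hn]
    ring

-- the scan over downList a finds the rightmost idx < a with P[idx] = c
lemma movesLoop_inv (P : List Char) (c : Char) (a : Nat) (ha : a ≤ P.length) :
    (movesLoop P c (downList a) = (P.length : Int) ∧ ∀ idx < a, P[idx]? ≠ some c) ∨
    (∃ idx < a, P[idx]? = some c ∧ movesLoop P c (downList a) = (P.length : Int) - 1 - idx ∧
      ∀ idx', idx < idx' → idx' < a → P[idx']? ≠ some c) := by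
  induction a with
  | zero =>
    left
    refine ⟨by simp [downList, movesLoop], fun idx h => by omega⟩
  | succ a ih =>
    rw [downList_succ]
    by_cases hc : P[a]? = some c
    · right
      exact ⟨a, by omega, hc,
        by simp [movesLoop, PySem.List.pyGet?_natCast, hc],
        fun idx' h1 h2 => by omega⟩
    · have hstep : movesLoop P c ((a : Int) :: downList a) = movesLoop P c (downList a) := by
        simp [movesLoop, PySem.List.pyGet?_natCast, hc]
      rw [hstep]
      rcases ih (by omega) with ⟨heq, hall⟩ | ⟨idx, hidx, hPc, heq, hafter⟩
      · left
        refine ⟨heq, fun idx' hidx' => ?_⟩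
        rcases Nat.lt_or_ge idx' a with h | h
        · exact hall idx' h
        · have : idx' = a := by omega
          rw [this]; exact hc
      · right
        refine ⟨idx, by omega, hPc, heq, fun idx' h1 h2 => ?_⟩
        rcases Nat.lt_or_ge idx' a with h | h
        · exact hafter idx' h1 h
        · have : idx' = a := by omega
          rw [this]; exact hc

lemma moves_spec (P : List Char) (c : Char) (hn : 1 ≤ P.length) :
    (1 ≤ moves P c ∧ moves P c ≤ (P.length : Int)) ∧
      ∀ d : Nat, 1 ≤ d → (d : Int) < moves P c → P[P.length - 1 - d]? ≠ some c := by
  have hr : moves P c = movesLoop P c (downList (P.length - 1)) := by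
    rw [moves, pyRange_eq_downList P.length hn]
  rcases movesLoop_inv P c (P.length - 1) (by omega) with ⟨heq, hall⟩ | ⟨idx, hidx, hPc, heq, hafter⟩
  · rw [hr, heq]
    refine ⟨⟨by exact_mod_cast hn, le_refl _⟩, fun d hd hlt => ?_⟩
    have hd' : d < P.length := by exact_mod_cast hlt
    exact hall (P.length - 1 - d) (by omega)
  · rw [hr, heq]
    refine ⟨⟨by omega, by omega⟩, fun d hd hlt => ?_⟩
    have hdlt : d < P.length - 1 - idx := by omega
    exact hafter (P.length - 1 - d) (by omega) (by omega)

lemma prefix_iff_getElem? (p l : List Char) :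
    p <+: l ↔ p.length ≤ l.length ∧ ∀ d < p.length, p[d]? = l[d]? := by
  constructor
  · intro h
    obtain ⟨hl, he⟩ := List.prefix_iff_getElem.mp h
    refine ⟨hl, fun d hd => ?_⟩
    rw [List.getElem?_eq_getElem hd, List.getElem?_eq_getElem (hd.trans_le hl), he d hd]
  · rintro ⟨hl, he⟩
    rw [List.prefix_iff_getElem]
    refine ⟨hl, fun i hi => ?_⟩
    have h := he i hi
    rw [List.getElem?_eq_getElem hi, List.getElem?_eq_getElem (hi.trans_le hl)] at h
    exact Option.some_injective _ h

-- go on an empty list / zero fuel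
lemma go_nil (sub : List Char) (f acc : Nat) : PySem.Chars.count.go sub f [] acc = acc := by
  cases f <;> simp [PySem.Chars.count.go]

lemma go_zero (sub l : List Char) (acc : Nat) : PySem.Chars.count.go sub 0 l acc = acc := by
  rw [PySem.Chars.count.go]

lemma go_cons (sub : List Char) (f : Nat) (h : Char) (t : List Char) (acc : Nat) :
    PySem.Chars.count.go sub (f + 1) (h :: t) acc =
      (if sub.isPrefixOf (h :: t) then PySem.Chars.count.go sub f ((h :: t).drop sub.length) (acc + 1)
       else PySem.Chars.count.go sub f t acc) := by
  rw [PySem.Chars.count.go]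

lemma go_acc (sub : List Char) (f : Nat) : ∀ (l : List Char) (acc : Nat),
    PySem.Chars.count.go sub f l acc = acc + PySem.Chars.count.go sub f l 0 := by
  induction f with
  | zero => intro l acc; simp [go_zero]
  | succ f ih =>
    intro l acc
    cases l with
    | nil => simp [go_nil]
    | cons h t =>
      rw [go_cons, go_cons]
      split_ifs with hp
      · rw [ih _ (acc + 1), ih _ (0 + 1)]; omega
      · exact ih t acc

lemma go_fuel (sub : List Char) (hs : 1 ≤ sub.length) (f : Nat) : ∀ (f' : Nat) (l : List Char) (acc : Nat),
    l.length ≤ f → l.length ≤ f' →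
    PySem.Chars.count.go sub f l acc = PySem.Chars.count.go sub f' l acc := by
  induction f with
  | zero =>
    intro f' l acc h1 _
    cases l with
    | nil => simp [go_nil]
    | cons h t => simp at h1
  | succ f ih =>
    intro f' l acc h1 h2
    cases l with
    | nil => simp [go_nil]
    | cons h t =>
      cases f' with
      | zero => simp at h2
      | succ f'' =>
        rw [go_cons, go_cons]
        split_ifs with hp
        · apply ih <;> simp only [List.length_drop, List.length_cons] at h1 h2 ⊢ <;> omega
        · apply ih <;> simp at h1 h2 ⊢ <;> omega

lemma go_short (sub : List Char) (f : Nat) : ∀ (l : List Char) (acc : Nat), l.length < sub.length →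
    PySem.Chars.count.go sub f l acc = acc := by
  induction f with
  | zero => intro l acc _; exact go_zero sub l acc
  | succ f ih =>
    intro l acc hl
    cases l with
    | nil => exact go_nil sub _ acc
    | cons h t =>
      rw [go_cons]
      split_ifs with hp
      · have := (List.isPrefixOf_iff_prefix.mp hp).length_le
        simp at this hl; omega
      · exact ih t acc (by simp at hl ⊢; omega)

-- skipping positions where no match starts does not change the count
lemma go_skip (t p : List Char) (v : Nat) : ∀ k : Nat, (∀ s < v, ¬ p <+: t.drop (k + s)) →
    PySem.Chars.count.go p (t.length - k) (t.drop k) 0 =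
    PySem.Chars.count.go p (t.length - (k + v)) (t.drop (k + v)) 0 := by
  induction v with
  | zero => intro k _; rfl
  | succ v ih =>
    intro k h
    rcases Nat.lt_or_ge k t.length with hk | hk
    · have hdrop : t.drop k = t[k] :: t.drop (k + 1) := List.drop_eq_getElem_cons hk
      have hfuel : t.length - k = (t.length - (k + 1)) + 1 := by omega
      rw [hfuel, hdrop, go_cons,
        if_neg (by rw [← hdrop]; simpa [List.isPrefixOf_iff_prefix] using h 0 (by omega))]
      have := ih (k + 1) (fun s hs => by
        have h' := h (s + 1) (by omega)
        have e : k + 1 + s = k + (s + 1) := by omega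
        rw [e]; exact h')
      rw [this, show k + 1 + v = k + (v + 1) from by omega]
    · have h1 : t.length - k = 0 := by omega
      have h2 : t.length - (k + (v + 1)) = 0 := by omega
      rw [h1, h2, go_zero, go_zero]

lemma inner_some (t p : List Char) (i n : Int) : ∀ (jn : Nat) (j : Int) (mv : Int),
    moorInner t p i n jn j = some mv → mv = moves p (PySem.List.pyGetD t (i + n - 1) ' ') := by
  intro jn
  induction jn with
  | zero => intro j mv h; simp [moorInner] at h
  | succ jn ih =>
    intro j mv h
    rw [moorInner] at h
    split_ifs at h with hne
    · exact (Option.some_injective _ h).symm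
    · exact ih (j - 1) mv h

lemma inner_none_iff (t p : List Char) (k : Nat) : ∀ jn : Nat, jn ≤ p.length →
    (moorInner t p (k : Int) (p.length : Int) jn ((jn : Int) - 1) = none ↔
      ∀ d < jn, t[k + d]? = p[d]?) := by
  intro jn
  induction jn with
  | zero => intro _; simp [moorInner]
  | succ jn ih =>
    intro hjn
    have h1 : ((jn + 1 : Nat) : Int) - 1 = (jn : Int) := by push_cast; ring
    have h2 : (k : Int) + (jn : Int) = ((k + jn : Nat) : Int) := by push_cast; ring
    rw [moorInner, h1, h2, PySem.List.pyGet?_natCast, PySem.List.pyGet?_natCast]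
    split_ifs with hne
    · simp only [false_iff, not_forall]
      exact ⟨jn, by omega, hne⟩
    · rw [not_not] at hne
      rw [ih (by omega)]
      constructor
      · intro hall d hd
        rcases Nat.lt_or_ge d jn with h | h
        · exact hall d h
        · have : d = jn := by omega
          rw [this]; exact hne
      · intro hall d hd
        exact hall d (by omega)

-- bad-character shift safety: no occurrence starts strictly inside the shift
lemma shift_safe (t p : List Char) (k : Nat) (hn : 1 ≤ p.length) (hkn : k + p.length ≤ t.length)
    (s : Nat) (hs : 1 ≤ s) (hlt : (s : Int) < moves p (PySem.List.pyGetD t ((k : Int) + p.length - 1) ' ')) :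
    ¬ p <+: t.drop (k + s) := by
  intro hpre
  have hcElem : PySem.List.pyGetD t ((k : Int) + p.length - 1) ' ' = t[k + p.length - 1]'(by omega) := by
    have e : (k : Int) + p.length - 1 = ((k + p.length - 1 : Nat) : Int) := by omega
    rw [PySem.List.pyGetD, e, PySem.List.pyGet?_natCast,
      List.getElem?_eq_getElem (by omega : k + p.length - 1 < t.length)]
    rfl
  obtain ⟨⟨_, _⟩, hno⟩ := moves_spec p (PySem.List.pyGetD t ((k : Int) + p.length - 1) ' ') hn
  have hslen : s < p.length := by
    have : (s : Int) < (p.length : Int) := lt_of_lt_of_le hlt (by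
      obtain ⟨⟨_, hle⟩, _⟩ := moves_spec p (PySem.List.pyGetD t ((k : Int) + p.length - 1) ' ') hn
      exact hle)
    exact_mod_cast this
  obtain ⟨hlen, hel⟩ := (prefix_iff_getElem? p (t.drop (k + s))).mp hpre
  have hd := hel (p.length - 1 - s) (by omega)
  rw [List.getElem?_drop] at hd
  have e2 : k + s + (p.length - 1 - s) = k + p.length - 1 := by omega
  rw [e2] at hd
  have : p[p.length - 1 - s]? = some (PySem.List.pyGetD t ((k : Int) + p.length - 1) ' ') := by
    rw [hd, hcElem, List.getElem?_eq_getElem (by omega : k + p.length - 1 < t.length)]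
  exact hno s hs hlt this

lemma moor_main (t p : List Char) (hn : 1 ≤ p.length) : ∀ (fuel : Nat) (k : Nat) (counts : Int),
    t.length + 1 ≤ fuel + k →
    moorLoop t p (t.length : Int) (p.length : Int) fuel (k : Int) counts =
      counts + (PySem.Chars.count.go p (t.length - k) (t.drop k) 0 : Int) := by
  intro fuel
  induction fuel with
  | zero =>
    intro k counts hf
    have h0 : t.length - k = 0 := by omega
    rw [h0, go_zero]
    simp [moorLoop]
  | succ fuel ih =>
    intro k counts hf
    rw [moorLoop]
    by_cases hcond : (k : Int) ≤ (t.length : Int) - (p.length : Int)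
    · rw [if_pos hcond]
      have hkn : k + p.length ≤ t.length := by omega
      have hk : k < t.length := by omega
      simp only [Int.toNat_natCast]
      cases hin : moorInner t p (↑k) (↑p.length) p.length ((p.length : Int) - 1) with
      | none =>
        show moorLoop t p (↑t.length) (↑p.length) fuel ((k : Int) + (p.length : Int)) (counts + 1) = _
        have hall := (inner_none_iff t p k p.length (le_refl _)).mp hin
        have hpre : p <+: t.drop k := (prefix_iff_getElem? _ _).mpr (by
          refine ⟨by simp [List.length_drop]; omega, fun d hd => ?_⟩
          rw [List.getElem?_drop]
          exact (hall d hd).symm)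
        have hdrop : t.drop k = t[k] :: t.drop (k + 1) := List.drop_eq_getElem_cons hk
        have hfuel2 : t.length - k = (t.length - (k + 1)) + 1 := by omega
        rw [hfuel2, hdrop, go_cons,
          if_pos (by rw [← hdrop]; exact List.isPrefixOf_iff_prefix.mpr hpre), ← hdrop,
          List.drop_drop, go_acc,
          go_fuel p hn _ (t.length - (k + p.length)) _ _
            (by simp only [List.length_drop]; omega) (by simp only [List.length_drop]; omega)]
        have e : (k : Int) + (p.length : Int) = ((k + p.length : Nat) : Int) := by push_cast; ring
        rw [e, ih (k + p.length) (counts + 1) (by omega)]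
        push_cast
        ring
      | some mv =>
        show moorLoop t p (↑t.length) (↑p.length) fuel ((k : Int) + mv) counts = _
        have hmv : mv = moves p (PySem.List.pyGetD t ((k : Int) + (p.length : Int) - 1) ' ') :=
          inner_some t p (↑k) (↑p.length) p.length ((p.length : Int) - 1) mv hin
        obtain ⟨⟨hmv1, hmv2⟩, _⟩ :=
          moves_spec p (PySem.List.pyGetD t ((k : Int) + (p.length : Int) - 1) ' ') hn
        rw [← hmv] at hmv1 hmv2
        set mvN := mv.toNat with hmvN
        have hcast : (mvN : Int) = mv := Int.toNat_of_nonneg (by omega)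
        have hnot : ∀ s < mvN, ¬ p <+: t.drop (k + s) := by
          intro s hsv
          rcases Nat.eq_zero_or_pos s with h0 | hpos
          · subst h0
            rw [Nat.add_zero]
            intro hpre
            have hall : ∀ d < p.length, t[k + d]? = p[d]? := by
              intro d hd
              obtain ⟨_, hel⟩ := (prefix_iff_getElem? _ _).mp hpre
              have h' := hel d hd
              rw [List.getElem?_drop] at h'
              exact h'.symm
            have h2 := (inner_none_iff t p k p.length (le_refl _)).mpr hall
            rw [hin] at h2
            exact absurd h2 (by simp)
          · exact shift_safe t p k hn hkn s hpos (by rw [← hmv]; omega)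
        have e : (k : Int) + mv = ((k + mvN : Nat) : Int) := by push_cast; omega
        rw [e, ih (k + mvN) counts (by omega), go_skip t p mvN k hnot]
    · rw [if_neg hcond]
      have hshort : (t.drop k).length < p.length := by simp [List.length_drop]; omega
      rw [go_short p _ _ 0 hshort]
      simp

-- ===== VERDICT (by name: the statement is the Claim_ definition above) =====
theorem moor_spec : Claim_equal_moor := by
  intro total patten _hdom hpre
  unfold Spec_moor moor moor_alt
  have hp : patten.toList ≠ [] := by
    simpa [String.toList_eq_nil_iff] using hpre
  have hn : 1 ≤ patten.toList.length := by
    cases h : patten.toList with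
    | nil => exact absurd h hp
    | cons a l => simp
  rw [PySem.Str.count]
  have := moor_main total.toList patten.toList hn (total.toList.length + 1) 0 0 (by omega)
  simp only [Nat.cast_zero] at this
  rw [this]
  unfold PySem.Chars.count
  simp [List.isEmpty_iff, hp]
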